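-- pv_equiv track=rewrite | github.com/bipentihexium/wys_arg_tools | wys_lib.py | humanscantsolvethis_gen
-- ===== SOURCE A (Python) =====
-- def humanscantsolvethis_gen(data:str, key:str="HUMANSCANTSOLVETHISSOBETTERSTOPHERE") -> list:
-- 	"""generates permutation with transposition using the HCSTSBSH algorithm (key defaults to HUMANSCANTSOLVE...)"""
-- 	key = [ord(c)-64 for c in key]
-- 	keyindex = 0
-- 	index = 0
-- 	data = list(range(len(data)))
-- 	result = []
-- 	while data:
-- 		index = (index + key[keyindex]) % len(data)
-- 		keyindex = (keyindex + 1) % len(key)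
-- 		result.append(data[index])
-- 		data = data[:index] + data[index+1:]
-- 	return result
-- ===== SOURCE B (Python) =====
-- def _build(n):
--     # segment-tree node: ('leaf', present) or ('node', size, count, left, right)
--     if n <= 1:
--         return ('leaf', True)
--     h = n // 2
--     return ('node', n, n, _build(h), _build(n - h))
--
-- def _cnt(t):
--     if t[0] == 'leaf':
--         return 1 if t[1] else 0
--     return t[2]
--
-- def _sz(t):
--     return 1 if t[0] == 'leaf' else t[1]
--
-- def _pop(t, k):
--     """remove the k-th (0-based) remaining leaf; return (its global leaf index, new tree)"""
--     if t[0] == 'leaf':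
--         return 0, ('leaf', False)
--     _, s, c, l, r = t
--     cl = _cnt(l)
--     if k < cl:
--         p, l2 = _pop(l, k)
--         return p, ('node', s, c - 1, l2, r)
--     p, r2 = _pop(r, k - cl)
--     return _sz(l) + p, ('node', s, c - 1, l, r2)
--
-- def humanscantsolvethis_gen(data: str, key: str = "HUMANSCANTSOLVETHISSOBETTERSTOPHERE") -> list:
--     ks = [ord(c) - 64 for c in key]
--     n = len(data)
--     if n == 0:
--         return []
--     t = _build(n)
--     index = 0
--     ki = 0
--     result = []
--     for rem in range(n, 0, -1):
--         index = (index + ks[ki]) % rem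
--         ki = (ki + 1) % len(ks)
--         p, t = _pop(t, index)
--         result.append(p)
--     return result
-- ===== Notes on version B (the rewrite author's own statement) =====
-- stated objective: faster
-- what changed: Replaces the quadratic shrinking-list slicing (data = data[:i] + data[i+1:]) with a segment tree over leaf indices that finds and deletes the k-th remaining element in O(log n).
import Mathlib
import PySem

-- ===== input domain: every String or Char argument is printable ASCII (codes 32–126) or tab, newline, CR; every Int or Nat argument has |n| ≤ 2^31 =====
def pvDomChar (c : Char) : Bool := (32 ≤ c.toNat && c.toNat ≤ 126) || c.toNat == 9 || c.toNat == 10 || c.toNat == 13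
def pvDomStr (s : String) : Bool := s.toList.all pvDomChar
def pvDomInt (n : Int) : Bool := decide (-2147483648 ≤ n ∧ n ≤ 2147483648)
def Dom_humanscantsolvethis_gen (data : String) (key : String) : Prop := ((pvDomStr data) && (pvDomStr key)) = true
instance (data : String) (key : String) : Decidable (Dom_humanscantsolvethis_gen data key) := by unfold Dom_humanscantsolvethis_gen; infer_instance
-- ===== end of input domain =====

-- B replaces A's quadratic shrinking-list slicing with a segment tree that finds and deletes the
-- k-th remaining leaf (objective: faster; a timing run measured B measurably faster).

-- ===== PORT A =====
-- while data: index = (index+key[keyindex]) % len(data); keyindex = (keyindex+1) % len(key);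
--             result.append(data[index]); data = data[:index] + data[index+1:]
def loopA (keyl : List Int) (keyindex index : Int) (data result : List Int) : List Int :=
  if data = [] then result
  else
    match PySem.List.pyGet? keyl keyindex with
    | none => result   -- Python raises IndexError here (empty key); excluded by Pre_
    | some kv =>
      let index' := PySem.Int.mod (index + kv) (data.length : Int)
      let keyindex' := PySem.Int.mod (keyindex + 1) (keyl.length : Int)
      match h : PySem.List.pyGet? data index' with
      | none => result   -- unreachable: 0 ≤ index' < len(data)
      | some x =>
        loopA keyl keyindex' index'
          (PySem.List.slice data none (some index') ++
           PySem.List.slice data (some (index' + 1)) none)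
          (result ++ [x])
termination_by data.length
decreasing_by
  · have hne : data ≠ [] := by assumption
    have hlen : 0 < (data.length : Int) := by
      exact_mod_cast List.length_pos_iff.mpr hne
    have h0 : 0 ≤ PySem.Int.mod (index + kv) (data.length : Int) :=
      PySem.Int.mod_nonneg _ hlen
    have h1 : PySem.Int.mod (index + kv) (data.length : Int) < (data.length : Int) :=
      PySem.Int.mod_lt _ hlen
    rw [PySem.List.slice_to data h0, PySem.List.slice_from data (by omega)]
    have ht : ((PySem.Int.mod (index + kv) (data.length : Int)) + 1).toNat
        = (PySem.Int.mod (index + kv) (data.length : Int)).toNat + 1 := by omega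
    rw [ht]
    simp only [List.length_append, List.length_take, List.length_drop]
    omega

def humanscantsolvethis_gen (data : String) (key : String) : List Int :=
  let keyl := key.toList.map (fun c => (c.toNat : Int) - 64)
  loopA keyl 0 0 (PySem.List.pyRange 0 (data.toList.length : Int) 1) []

-- ===== PORT B =====
-- segment-tree node: leaf present | node size count left right
inductive Seg
  | leaf : Bool → Seg
  | node : Int → Int → Seg → Seg → Seg
deriving DecidableEq, Repr

def Seg.cnt : Seg → Int
  | .leaf b => if b then 1 else 0
  | .node _ c _ _ => c

def Seg.sz : Seg → Int
  | .leaf _ => 1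
  | .node s _ _ _ => s

def buildSeg : Nat → Seg
  | 0 => .leaf true
  | 1 => .leaf true
  | (n+2) => .node ((n:Int)+2) ((n:Int)+2) (buildSeg ((n+2)/2)) (buildSeg ((n+2) - (n+2)/2))
decreasing_by all_goals omega

-- remove the k-th (0-based) remaining leaf; return (its global leaf index, new tree)
def popSeg : Seg → Int → Int × Seg
  | .leaf _, _ => (0, .leaf false)
  | .node s c l r, k =>
    let cl := l.cnt
    if k < cl then
      let pr := popSeg l k
      (pr.1, .node s (c - 1) pr.2 r)
    else
      let pr := popSeg r (k - cl)
      (l.sz + pr.1, .node s (c - 1) l pr.2)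

def loopB (ks : List Int) : Nat → Seg → Int → Int → List Int → List Int
  | 0, _, _, _, res => res
  | (rem+1), t, index, ki, res =>
    match PySem.List.pyGet? ks ki with
    | none => res   -- Python raises IndexError here (empty key); excluded by Pre_
    | some kv =>
      let idx := PySem.Int.mod (index + kv) ((rem : Int) + 1)
      let ki' := PySem.Int.mod (ki + 1) (ks.length : Int)
      let pr := popSeg t idx
      loopB ks rem pr.2 idx ki' (res ++ [pr.1])

def humanscantsolvethis_gen_alt (data : String) (key : String) : List Int :=
  let ks := key.toList.map (fun c => (c.toNat : Int) - 64)
  let n := data.toList.length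
  if n = 0 then [] else loopB ks n (buildSeg n) 0 0 []

-- ===== PRECONDITION & SPEC =====
-- Pre_ excludes only nonempty data with an empty key, on which BOTH Pythons raise IndexError
-- (key[0] / ks[0] on an empty list); A never returns there.
def Pre_humanscantsolvethis_gen (data : String) (key : String) : Prop :=
  data.toList = [] ∨ key.toList ≠ []
instance (data : String) (key : String) : Decidable (Pre_humanscantsolvethis_gen data key) := by
  unfold Pre_humanscantsolvethis_gen; infer_instance

def pvWitness_humanscantsolvethis_gen : String × String := ("abcd", "KEY")

def Spec_humanscantsolvethis_gen (data : String) (key : String) (out : List Int) : Prop :=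
  out = humanscantsolvethis_gen_alt data key
instance (data : String) (key : String) (out : List Int) :
    Decidable (Spec_humanscantsolvethis_gen data key out) := by
  unfold Spec_humanscantsolvethis_gen; infer_instance

-- ===== CLAIM (what is proved, stated in full; the proofs are below) =====
def Claim_equal_humanscantsolvethis_gen : Prop :=
  ∀ (data : String) (key : String), Dom_humanscantsolvethis_gen data key →
    Pre_humanscantsolvethis_gen data key →
    Spec_humanscantsolvethis_gen data key (humanscantsolvethis_gen data key)

-- ===== LEMMAS AND PROOFS =====

-- the list of presence flags a tree represents
def flags : Seg → List Bool
  | .leaf b => [b]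
  | .node _ _ l r => flags l ++ flags r

-- structural well-formedness: cached size and count are correct
def SegWF : Seg → Prop
  | .leaf _ => True
  | .node s _c l r =>
      s = ((flags l).length + (flags r).length : Int) ∧
      _c = (((flags l ++ flags r).count true : Nat) : Int) ∧ SegWF l ∧ SegWF r

-- the (0-based) positions of the true flags, as Ints
def trues : List Bool → List Int
  | [] => []
  | b :: bs => if b then 0 :: (trues bs).map (· + 1) else (trues bs).map (· + 1)

theorem sz_eq (t : Seg) (h : SegWF t) : t.sz = ((flags t).length : Int) := by
  cases t with
  | leaf b => simp [Seg.sz, flags]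
  | node s c l r =>
      simp only [SegWF] at h
      simp [Seg.sz, flags, h.1]

theorem cnt_eq (t : Seg) (h : SegWF t) : t.cnt = (((flags t).count true : Nat) : Int) := by
  cases t with
  | leaf b => cases b <;> simp [Seg.cnt, flags]
  | node s c l r =>
      simp only [SegWF] at h
      simp [Seg.cnt, flags, h.2.1]

theorem length_trues (fs : List Bool) : (trues fs).length = fs.count true := by
  induction fs with
  | nil => simp [trues]
  | cons b bs ih => cases b <;> simp [trues, ih, List.count_cons]

theorem map_one_shift (xs : List Int) (a : Nat) :
    (xs.map (· + (a : Int))).map (· + 1) = xs.map (· + ((a + 1 : Nat) : Int)) := by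
  induction xs with
  | nil => simp
  | cons x xs ih =>
      simp only [List.map_cons, ih]
      congr 1
      omega

theorem trues_append (fs gs : List Bool) :
    trues (fs ++ gs) = trues fs ++ (trues gs).map (· + (fs.length : Int)) := by
  induction fs with
  | nil => simp [trues]
  | cons b bs ih =>
      cases b <;>
        simp only [List.cons_append, trues, if_true, if_false, Bool.false_eq_true,
          ih, List.map_append, map_one_shift, List.length_cons, List.cons_append]
      all_goals rfl

theorem map_cast_succ (xs : List Nat) :
    (xs.map (fun k : Nat => (k : Int))).map (· + 1)
      = (xs.map Nat.succ).map (fun k : Nat => (k : Int)) := by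
  induction xs with
  | nil => rfl
  | cons x xs ih =>
      simp only [List.map_cons, ih]
      congr 1

theorem trues_replicate (n : Nat) :
    trues (List.replicate n true) = (List.range n).map (fun k : Nat => (k : Int)) := by
  induction n with
  | zero => simp [trues]
  | succ n ih =>
      rw [List.replicate_succ, List.range_succ_eq_map]
      simp only [trues, if_true, ih, List.map_cons, map_cast_succ, Nat.cast_zero]

theorem eraseIdx_map {α β : Type} (f : α → β) (xs : List α) (i : Nat) :
    (xs.map f).eraseIdx i = (xs.eraseIdx i).map f := by
  induction xs generalizing i with
  | nil => simp
  | cons x xs ih => cases i <;> simp [List.eraseIdx, ih]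

-- main pop lemma: on a well-formed tree, popSeg returns the k-th remaining position
-- and clears exactly that flag
theorem popSeg_spec (t : Seg) (k : Int) (hwf : SegWF t) (h0 : 0 ≤ k) (h1 : k < t.cnt) :
    (popSeg t k).1 = (trues (flags t)).getD k.toNat 0 ∧
    trues (flags (popSeg t k).2) = (trues (flags t)).eraseIdx k.toNat ∧
    (flags (popSeg t k).2).length = (flags t).length ∧
    SegWF (popSeg t k).2 := by
  induction t generalizing k with
  | leaf b =>
      cases b with
      | false => simp [Seg.cnt] at h1; omega
      | true =>
          have hk : k = 0 := by simp [Seg.cnt] at h1; omega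
          subst hk
          refine ⟨?_, ?_, ?_, ?_⟩ <;> simp [popSeg, flags, trues, SegWF, List.eraseIdx]
  | node s c l r ihl ihr =>
      obtain ⟨hs, hc, hwl, hwr⟩ := hwf
      have hcl : l.cnt = ((trues (flags l)).length : Int) := by
        rw [cnt_eq l hwl, length_trues]
      have hcr : r.cnt = ((trues (flags r)).length : Int) := by
        rw [cnt_eq r hwr, length_trues]
      have hcnt : Seg.cnt (.node s c l r) = l.cnt + r.cnt := by
        show c = _
        rw [hc, cnt_eq l hwl, cnt_eq r hwr, List.count_append]
        push_cast; ring
      set TL := trues (flags l) with hTL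
      set TR := trues (flags r) with hTR
      have htr : trues (flags (Seg.node s c l r)) =
          TL ++ TR.map (· + ((flags l).length : Int)) := by
        simp only [flags, trues_append]
        rfl
      by_cases hlt : k < l.cnt
      · -- go left
        have hpop : popSeg (Seg.node s c l r) k
            = ((popSeg l k).1, Seg.node s (c - 1) (popSeg l k).2 r) := by
          simp only [popSeg, if_pos hlt]
        obtain ⟨hp, he, hl, hw⟩ := ihl k hwl h0 hlt
        have hkn : k.toNat < TL.length := by omega
        refine ⟨?_, ?_, ?_, ?_⟩
        · rw [hpop, hp, htr]
          exact (List.getD_append TL _ 0 k.toNat hkn).symm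
        · rw [hpop]
          show trues (flags (popSeg l k).2 ++ flags r) = _
          rw [trues_append, he, hl, htr, List.eraseIdx_append_of_lt_length hkn]
        · rw [hpop]
          show (flags (popSeg l k).2 ++ flags r).length = (flags l ++ flags r).length
          simp [hl]
        · rw [hpop]
          refine ⟨by rw [hl]; exact hs, ?_, hw, hwr⟩
          have k1 := length_trues (flags (popSeg l k).2)
          have k2 := length_trues (flags l)
          have k3 : (trues (flags (popSeg l k).2)).length = TL.length - 1 := by
            rw [he]; exact List.length_eraseIdx_of_lt hkn
          have k4 : TL.length = (trues (flags l)).length := rfl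
          rw [hc]
          simp only [List.count_append]
          push_cast
          omega
      · -- go right
        push_neg at hlt
        have hpop : popSeg (Seg.node s c l r) k
            = (l.sz + (popSeg r (k - l.cnt)).1, Seg.node s (c - 1) l (popSeg r (k - l.cnt)).2) := by
          simp only [popSeg, if_neg (not_lt.mpr hlt)]
        rw [hcnt] at h1
        have hkr0 : 0 ≤ k - l.cnt := by omega
        have hkr1 : k - l.cnt < r.cnt := by omega
        obtain ⟨hp, he, hl, hw⟩ := ihr (k - l.cnt) hwr hkr0 hkr1
        have hkn : k.toNat = TL.length + (k - l.cnt).toNat := by omega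
        have hkrlen : (k - l.cnt).toNat < TR.length := by omega
        refine ⟨?_, ?_, ?_, ?_⟩
        · rw [hpop, htr, hkn,
              List.getD_append_right TL _ 0 _ (Nat.le_add_right _ _), Nat.add_sub_cancel_left]
          show l.sz + (popSeg r (k - l.cnt)).1 = _
          have hmap : (TR.map (· + ((flags l).length : Int))).getD (k - l.cnt).toNat 0
              = TR.getD (k - l.cnt).toNat 0 + ((flags l).length : Int) := by
            rw [List.getD_eq_getElem _ _ (by simpa using hkrlen),
                List.getD_eq_getElem _ _ hkrlen, List.getElem_map]
          rw [hmap, hp, sz_eq l hwl]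
          ring
        · rw [hpop]
          show trues (flags l ++ flags (popSeg r (k - l.cnt)).2) = _
          rw [trues_append, he, htr, hkn,
              List.eraseIdx_append_of_length_le (Nat.le_add_right _ _),
              Nat.add_sub_cancel_left, eraseIdx_map]
        · rw [hpop]
          show (flags l ++ flags (popSeg r (k - l.cnt)).2).length = (flags l ++ flags r).length
          simp [hl]
        · rw [hpop]
          refine ⟨by rw [hl]; exact hs, ?_, hwl, hw⟩
          have k1 := length_trues (flags (popSeg r (k - l.cnt)).2)
          have k2 := length_trues (flags r)
          have k3 : (trues (flags (popSeg r (k - l.cnt)).2)).length = TR.length - 1 := by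
            rw [he]; exact List.length_eraseIdx_of_lt hkrlen
          have k4 : TR.length = (trues (flags r)).length := rfl
          rw [hc]
          simp only [List.count_append]
          push_cast
          omega

theorem buildSeg_spec (n : Nat) (hn : 1 ≤ n) :
    flags (buildSeg n) = List.replicate n true ∧ SegWF (buildSeg n) := by
  induction n using buildSeg.induct with
  | case1 => omega
  | case2 => refine ⟨?_, ?_⟩ <;> simp [buildSeg, flags, SegWF, List.replicate]
  | case3 n ih1 ih2 =>
      obtain ⟨f1, w1⟩ := ih1 (by omega)
      obtain ⟨f2, w2⟩ := ih2 (by omega)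
      refine ⟨?_, ?_⟩
      · simp only [buildSeg, flags, f1, f2, ← List.replicate_add]
        congr 1
        omega
      · simp only [buildSeg, SegWF, f1, f2]
        refine ⟨?_, ?_, w1, w2⟩
        · simp only [List.length_replicate]
          push_cast
          omega
        · rw [← List.replicate_add]
          simp only [List.count_replicate]
          simp only [BEq.rfl, if_true]
          push_cast
          omega

-- the two loops agree when the tree represents A's remaining list
theorem loop_agree (ks : List Int) (rem : Nat) :
    ∀ (t : Seg) (ki index : Int) (res : List Int), SegWF t →
      (flags t).count true = rem →
      loopA ks ki index (trues (flags t)) res = loopB ks rem t index ki res := by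
  induction rem with
  | zero =>
      intro t ki index res hwf hcnt
      have hnil : trues (flags t) = [] := by
        rw [← List.length_eq_zero_iff, length_trues, hcnt]
      rw [loopA, hnil, if_pos rfl]
      rfl
  | succ rem ih =>
      intro t ki index res hwf hcnt
      have hlen : (trues (flags t)).length = rem + 1 := by
        rw [length_trues, hcnt]
      have hne : trues (flags t) ≠ [] := by
        intro h; rw [h] at hlen; simp at hlen
      rw [loopA, loopB, if_neg hne]
      cases hg : PySem.List.pyGet? ks ki with
      | none => rfl
      | some kv =>
        simp only []
        have hlc : ((trues (flags t)).length : Int) = (rem : Int) + 1 := by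
          rw [hlen]; push_cast; ring
        rw [hlc]
        set idx := PySem.Int.mod (index + kv) ((rem : Int) + 1) with hidx
        have h0 : 0 ≤ idx := PySem.Int.mod_nonneg _ (by omega)
        have h1 : idx < (rem : Int) + 1 := PySem.Int.mod_lt _ (by omega)
        have hcnti : t.cnt = (rem : Int) + 1 := by
          rw [cnt_eq t hwf, hcnt]; push_cast; ring
        obtain ⟨hp, he, _hfl, hw⟩ := popSeg_spec t idx hwf h0 (by omega)
        have hkn : idx.toNat < (trues (flags t)).length := by omega
        have hgd : PySem.List.pyGet? (trues (flags t)) idx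
            = some ((trues (flags t)).getD idx.toNat 0) := by
          rw [PySem.List.pyGet?_of_nonneg _ h0, List.getElem?_eq_getElem hkn,
              List.getD_eq_getElem _ _ hkn]
        rw [hgd]
        simp only []
        rw [PySem.List.slice_to _ h0, PySem.List.slice_from _ (by omega : (0:Int) ≤ idx + 1)]
        have ht1 : (idx + 1).toNat = idx.toNat + 1 := by omega
        rw [ht1, ← List.eraseIdx_eq_take_drop_succ, ← he, ← hp]
        apply ih _ _ _ _ hw
        have e1 : (trues (flags (popSeg t idx).2)).length = (trues (flags t)).length - 1 := by
          rw [he]; exact List.length_eraseIdx_of_lt hkn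
        have e2 := length_trues (flags (popSeg t idx).2)
        omega

-- ===== VERDICT (by name: the statement is the Claim_ definition above) =====
theorem humanscantsolvethis_gen_spec : Claim_equal_humanscantsolvethis_gen := by
  intro data key _hdom _hpre
  show humanscantsolvethis_gen data key = humanscantsolvethis_gen_alt data key
  simp only [humanscantsolvethis_gen, humanscantsolvethis_gen_alt]
  by_cases hn : data.toList.length = 0
  · rw [hn, if_pos rfl]
    have h0 : PySem.List.pyRange 0 ((0 : Nat) : Int) 1 = [] := by
      rw [PySem.List.pyRange_zero_natCast]; simp
    rw [h0, loopA, if_pos rfl]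
  · rw [if_neg hn]
    obtain ⟨hf, hw⟩ := buildSeg_spec data.toList.length (by omega)
    have hr : PySem.List.pyRange 0 (data.toList.length : Int) 1
        = trues (flags (buildSeg data.toList.length)) := by
      rw [hf, trues_replicate]
      exact PySem.List.pyRange_zero_natCast _
    rw [hr]
    exact loop_agree _ _ _ _ _ _ hw
      (by rw [hf]; simp only [List.count_replicate, BEq.rfl, if_true])
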